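-- pv_equiv track=rewrite | github.com/hanzala-sohrab/CP | Codeforces/2126/B.py | maximum_number_of_peaks
-- ===== SOURCE A (Python) =====
-- def maximum_number_of_peaks(n: int, k: int, a: list[int]):
--     ans = 0
--     cnt = 0
--     for i in range(n):
--         if a[i] == 1:
--             ans += (cnt + 1) // k
--             cnt = 0
--         else:
--             cnt += 1
--     ans += (cnt + 1) // k
--     return ans
-- ===== SOURCE B (Python) =====
-- def maximum_number_of_peaks(n: int, k: int, a: list[int]):
--     segments = ''.join('1' if x == 1 else '0' for _, x in zip(range(n), a)).split('1')
--     return sum((len(seg) + 1) // k for seg in segments)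
-- ===== Notes on version B (the rewrite author's own statement) =====
-- stated objective: idiomatic
-- what changed: Replaces A's flush-on-1 loop with two running accumulators by a declarative pipeline: map the first n elements to a '0'/'1' string, let str.split('1') produce the zero-run segments (empty segments included), and sum (len(seg)+1)//k over them.
import Mathlib
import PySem

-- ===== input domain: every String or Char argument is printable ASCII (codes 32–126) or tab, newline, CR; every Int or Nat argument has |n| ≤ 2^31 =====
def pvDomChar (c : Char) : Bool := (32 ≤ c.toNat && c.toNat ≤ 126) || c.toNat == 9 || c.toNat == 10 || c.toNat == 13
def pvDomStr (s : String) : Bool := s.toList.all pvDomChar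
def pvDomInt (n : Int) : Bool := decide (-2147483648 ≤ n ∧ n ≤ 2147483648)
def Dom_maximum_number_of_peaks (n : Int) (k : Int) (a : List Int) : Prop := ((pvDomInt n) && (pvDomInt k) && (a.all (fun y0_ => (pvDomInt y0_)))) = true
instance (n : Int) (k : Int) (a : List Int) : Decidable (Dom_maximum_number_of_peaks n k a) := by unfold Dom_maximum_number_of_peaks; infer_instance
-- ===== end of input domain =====

-- B replaces A's flush-on-1 accumulator loop by an idiomatic pipeline: map the array to a
-- '0'/'1' string, split it on '1' to obtain the zero-run segments, and sum (len(seg)+1)//k.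

-- ===== PORT A =====
-- a[i] is ported as pyGetD (in range for every i in range(n) under Pre_, which requires n ≤ len(a)).
def maximum_number_of_peaks (n : Int) (k : Int) (a : List Int) : Int :=
  let st := (PySem.List.pyRange 0 n 1).foldl
    (fun (st : Int × Int) i =>
      if PySem.List.pyGetD a i 0 == 1 then (st.1 + PySem.Int.floordiv (st.2 + 1) k, 0)
      else (st.1, st.2 + 1)) (0, 0)
  st.1 + PySem.Int.floordiv (st.2 + 1) k

-- ===== PORT B =====
def maximum_number_of_peaks_alt (n : Int) (k : Int) (a : List Int) : Int :=
  let segments := PySem.Chars.splitOn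
    (PySem.Chars.join [] (((PySem.List.pyRange 0 n 1).zip a).map
      (fun p => if p.2 == 1 then ['1'] else ['0']))) ['1']
  (segments.map (fun seg => PySem.Int.floordiv ((seg.length : Int) + 1) k)).sum

-- ===== PRECONDITION & SPEC =====
-- exactly the inputs where A returns: k ≠ 0 excludes ZeroDivisionError and
-- n ≤ len(a) excludes IndexError; A returns on every other (n, k, a).
def Pre_maximum_number_of_peaks (n : Int) (k : Int) (a : List Int) : Prop :=
  n ≤ (a.length : Int) ∧ k ≠ 0
instance (n : Int) (k : Int) (a : List Int) : Decidable (Pre_maximum_number_of_peaks n k a) := by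
  unfold Pre_maximum_number_of_peaks; infer_instance

def pvWitness_maximum_number_of_peaks : Int × Int × List Int := (3, 2, [1, 0, 0])

def Spec_maximum_number_of_peaks (n : Int) (k : Int) (a : List Int) (out : Int) : Prop := out = maximum_number_of_peaks_alt n k a
instance (n : Int) (k : Int) (a : List Int) (out : Int) : Decidable (Spec_maximum_number_of_peaks n k a out) := by unfold Spec_maximum_number_of_peaks; infer_instance

-- ===== CLAIM (what is proved, stated in full; the proofs are below) =====
def Claim_equal_maximum_number_of_peaks : Prop := ∀ (n : Int) (k : Int) (a : List Int), Dom_maximum_number_of_peaks n k a → Pre_maximum_number_of_peaks n k a → Spec_maximum_number_of_peaks n k a (maximum_number_of_peaks n k a)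

-- ===== LEMMAS AND PROOFS =====

-- the character an element of `a` is mapped to in B
def pvCh (x : Int) : Char := if x == 1 then '1' else '0'

-- structural description of ''-joined-string .split('1'): the list of zero-run segments
def pvSegs : List Char → List (List Char)
  | [] => [[]]
  | c :: cs => if c = '1' then [] :: pvSegs cs
               else (c :: (pvSegs cs).headD []) :: (pvSegs cs).tail

lemma pvSegs_ne_nil (cs : List Char) : pvSegs cs ≠ [] := by
  cases cs with
  | nil => simp [pvSegs]
  | cons c cs => simp only [pvSegs]; split <;> simp

lemma pvSegs_cons_eq (cs : List Char) :
    (pvSegs cs).headD [] :: (pvSegs cs).tail = pvSegs cs := by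
  cases h : pvSegs cs with
  | nil => exact absurd h (pvSegs_ne_nil cs)
  | cons x t => rfl

lemma pvSegs_cons_eq' (cs : List Char) :
    (pvSegs cs).head?.getD [] :: (pvSegs cs).tail = pvSegs cs := by
  cases h : pvSegs cs with
  | nil => exact absurd h (pvSegs_ne_nil cs)
  | cons x t => rfl

lemma pvSegs_one_cons (cs : List Char) : pvSegs ('1' :: cs) = [] :: pvSegs cs := by
  simp [pvSegs]

lemma pvSegs_zero_cons (cs : List Char) :
    pvSegs ('0' :: cs) = ('0' :: (pvSegs cs).headD []) :: (pvSegs cs).tail := by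
  simp [pvSegs]

lemma pvGo_spec : ∀ (l : List Char) (fuel : Nat) (cur : List Char) (acc : List (List Char)),
    l.length < fuel →
    PySem.Chars.splitOn.go ['1'] fuel l cur acc =
      acc.reverse ++ (cur.reverse ++ (pvSegs l).headD []) :: (pvSegs l).tail := by
  intro l
  induction l with
  | nil =>
    intro fuel cur acc h
    cases fuel with
    | zero => omega
    | succ f => simp [PySem.Chars.splitOn.go, pvSegs]
  | cons c rest ih =>
    intro fuel cur acc h
    cases fuel with
    | zero => simp at h
    | succ f =>
      simp only [PySem.Chars.splitOn.go]
      by_cases hc : c = '1'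
      · subst hc
        rw [if_pos (by simp)]
        have hdrop : List.drop ['1'].length ('1' :: rest) = rest := rfl
        simp only [List.length_cons] at h
        rw [hdrop, ih f [] (cur.reverse :: acc) (by omega)]
        simp [pvSegs, pvSegs_cons_eq']
      · rw [if_neg (by simpa using Ne.symm hc)]
        simp only [List.length_cons] at h
        rw [ih f (c :: cur) acc (by omega)]
        simp [pvSegs, hc]

lemma pvSplitOn_eq (l : List Char) : PySem.Chars.splitOn l ['1'] = pvSegs l := by
  unfold PySem.Chars.splitOn
  rw [pvGo_spec l (l.length + 1) [] [] (by omega)]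
  simp [pvSegs_cons_eq']

-- A's loop over xs, related to the segment decomposition of xs.map pvCh
lemma pvLoop_eq (k : Int) : ∀ (xs : List Int) (ans cnt : Int),
    (xs.foldl (fun (st : Int × Int) x =>
        if x == 1 then (st.1 + PySem.Int.floordiv (st.2 + 1) k, 0)
        else (st.1, st.2 + 1)) (ans, cnt)).1
      + PySem.Int.floordiv ((xs.foldl (fun (st : Int × Int) x =>
        if x == 1 then (st.1 + PySem.Int.floordiv (st.2 + 1) k, 0)
        else (st.1, st.2 + 1)) (ans, cnt)).2 + 1) k
    = ans + PySem.Int.floordiv (cnt + (((pvSegs (xs.map pvCh)).headD []).length : Int) + 1) k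
        + (((pvSegs (xs.map pvCh)).tail).map
            (fun seg => PySem.Int.floordiv ((seg.length : Int) + 1) k)).sum := by
  intro xs
  induction xs with
  | nil => intro ans cnt; simp [pvSegs]
  | cons x rest ih =>
    intro ans cnt
    by_cases hx : x = 1
    · subst hx
      simp only [List.foldl_cons, List.map_cons]
      rw [if_pos (show ((1 : Int) == 1) = true from rfl)]
      rw [ih (ans + PySem.Int.floordiv (cnt + 1) k) 0]
      have hsplit : (pvSegs (rest.map pvCh)).map
            (fun seg => PySem.Int.floordiv ((seg.length : Int) + 1) k)
          = PySem.Int.floordiv ((((pvSegs (rest.map pvCh)).headD []).length : Int) + 1) k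
            :: ((pvSegs (rest.map pvCh)).tail).map
                (fun seg => PySem.Int.floordiv ((seg.length : Int) + 1) k) := by
        conv_lhs => rw [← pvSegs_cons_eq (rest.map pvCh)]
        simp
      have hch1 : pvCh 1 = '1' := rfl
      rw [hch1, pvSegs_one_cons]
      simp only [List.headD_cons, List.tail_cons, hsplit, List.sum_cons,
        List.length_nil, Nat.cast_zero, add_zero, zero_add]
      ring
    · have hx' : (x == 1) = false := by simp [hx]
      simp only [List.foldl_cons, List.map_cons]
      rw [if_neg (by simp [hx])]
      rw [ih ans (cnt + 1)]
      have hch : pvCh x = '0' := by simp [pvCh, hx]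
      rw [hch, pvSegs_zero_cons]
      simp only [List.headD_cons, List.tail_cons, List.length_cons]
      push_cast
      ring_nf

-- ===== VERDICT (by name: the statement is the Claim_ definition above) =====
theorem maximum_number_of_peaks_spec : Claim_equal_maximum_number_of_peaks := by
  intro n k a _ hpre
  obtain ⟨hnlen, hk⟩ := hpre
  unfold Spec_maximum_number_of_peaks maximum_number_of_peaks maximum_number_of_peaks_alt
  dsimp only
  set m := List.take n.toNat a with hm
  -- B side: zip(range(n), a) keeps the first n elements; the joined singleton
  -- strings are the mapped char list; split = pvSegs
  have hle : (PySem.List.pyRange 0 n 1).length ≤ a.length := by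
    rw [PySem.List.length_pyRange_one]; omega
  have hzip : ((PySem.List.pyRange 0 n 1).zip a).map Prod.snd = m := by
    conv_lhs => rw [List.zip_eq_zip_take_min, min_eq_left hle, List.take_length]
    rw [List.map_snd_zip (by simp), PySem.List.length_pyRange_one, hm]
    norm_num
  have hcomp : (fun (p : Int × Int) => if p.2 == 1 then ['1'] else ['0'])
      = (fun (x : Int) => if x == 1 then ['1'] else ['0']) ∘ Prod.snd := rfl
  rw [hcomp, ← List.map_map, hzip]
  have hmap : m.map (fun x => if x == 1 then ['1'] else ['0'])
      = (m.map pvCh).map (fun c => [c]) := by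
    rw [List.map_map]
    refine List.map_congr_left (fun x _ => ?_)
    by_cases hx : x = 1 <;> simp [pvCh, hx]
  rw [hmap, PySem.Chars.join_nil_singletons, pvSplitOn_eq]
  -- A side: the range-indexed loop is the loop over m
  have hfold : (PySem.List.pyRange 0 n 1).foldl
      (fun (st : Int × Int) i =>
        if PySem.List.pyGetD a i 0 == 1 then (st.1 + PySem.Int.floordiv (st.2 + 1) k, 0)
        else (st.1, st.2 + 1)) ((0 : Int), (0 : Int))
      = m.foldl
        (fun (st : Int × Int) x =>
          if x == 1 then (st.1 + PySem.Int.floordiv (st.2 + 1) k, 0)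
          else (st.1, st.2 + 1)) ((0 : Int), (0 : Int)) := by
    by_cases hn0 : 0 ≤ n
    · have hlen : ((m.length : Nat) : Int) = n := by rw [hm]; simp; omega
      have hget : ∀ (st : Int × Int), ∀ j ∈ PySem.List.pyRange 0 n 1,
          (if PySem.List.pyGetD a j 0 == 1 then (st.1 + PySem.Int.floordiv (st.2 + 1) k, (0 : Int))
           else (st.1, st.2 + 1))
          = (if PySem.List.pyGetD m j 0 == 1
             then (st.1 + PySem.Int.floordiv (st.2 + 1) k, (0 : Int))
             else (st.1, st.2 + 1)) := by
        intro st j hj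
        rw [PySem.List.mem_pyRange_one] at hj
        have hjl : j.toNat < a.length := by omega
        have hjm : j.toNat < m.length := by rw [hm]; simp; omega
        have h1 : PySem.List.pyGetD a j 0 = a[j.toNat]'hjl :=
          PySem.List.pyGetD_eq_getElem a 0 hj.1 (by omega)
        have h2 : PySem.List.pyGetD m j 0 = m[j.toNat]'hjm :=
          PySem.List.pyGetD_eq_getElem m 0 hj.1 (by exact_mod_cast hlen ▸ (by omega : j < n))
        have h3 : m[j.toNat]'hjm = a[j.toNat]'hjl := by
          simp [hm, List.getElem_take]
        rw [h1, h2, h3]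
      rw [PySem.List.foldl_congr_mem _ _
        (fun (st : Int × Int) i =>
          if PySem.List.pyGetD m i 0 == 1
          then (st.1 + PySem.Int.floordiv (st.2 + 1) k, 0)
          else (st.1, st.2 + 1)) _ hget, ← hlen]
      exact PySem.List.foldl_pyRange_zero_pyGetD' m 0
        (fun (st : Int × Int) x =>
          if x == 1 then (st.1 + PySem.Int.floordiv (st.2 + 1) k, 0)
          else (st.1, st.2 + 1)) ((0 : Int), (0 : Int))
    · have hr : PySem.List.pyRange 0 n 1 = [] := PySem.List.pyRange_one_eq_nil (by omega)
      have hm0 : m = [] := by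
        rw [hm, Int.toNat_of_nonpos (by omega)]; rfl
      rw [hr, hm0]
      simp
  rw [hfold, pvLoop_eq k m 0 0]
  conv_rhs => rw [← pvSegs_cons_eq (m.map pvCh)]
  simp only [List.map_cons, List.sum_cons, zero_add]
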